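-- pv_equiv track=rewrite | github.com/daniella1sim/softproj | analysis.py | index_of_max_in_lists
-- ===== SOURCE A (Python) =====
-- import math
--
-- def index_of_max_in_lists(H):
--     res = []
--     for i in range(len(H)):
--         if H[i] == []:
--             res.append(None)
--             continue
--         max_val = -math.inf
--         index = 0
--         for j in range(len(H[i])):
--             if H[i][j] > max_val:
--                 max_val = H[i][j]
--                 index = j
--         res.append(index)
--     return res
-- ===== SOURCE B (Python) =====
-- def index_of_max_in_lists(H):
--     return [sorted(range(len(sub)), key=sub.__getitem__, reverse=True)[0] if sub else None
--             for sub in H]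
-- ===== Notes on version B (the rewrite author's own statement) =====
-- stated objective: alternative
-- what changed: Replaces A's single running max-value+index tracking scan by a stable reverse sort of the sublist's indices keyed by their values, taking the first sorted index; stability of Python's sorted guarantees this is the earliest maximum.
import Mathlib
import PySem

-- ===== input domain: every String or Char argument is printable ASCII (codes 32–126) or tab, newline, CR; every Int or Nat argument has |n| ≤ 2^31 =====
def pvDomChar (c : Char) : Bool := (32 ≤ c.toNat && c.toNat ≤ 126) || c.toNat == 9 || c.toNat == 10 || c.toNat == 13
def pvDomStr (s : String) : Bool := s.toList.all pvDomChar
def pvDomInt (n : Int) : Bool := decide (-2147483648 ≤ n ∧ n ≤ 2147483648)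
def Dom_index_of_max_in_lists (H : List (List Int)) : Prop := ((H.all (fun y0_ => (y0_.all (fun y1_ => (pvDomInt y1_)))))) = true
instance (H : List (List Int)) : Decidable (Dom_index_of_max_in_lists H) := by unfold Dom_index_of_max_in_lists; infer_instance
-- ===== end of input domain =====

-- B replaces A's running-max scan by a stable reverse sort of the indices keyed by value, taking the first
-- element (stability makes it the earliest maximum): a different algorithm of higher cost, chosen for contrast.


-- ===== PORT A =====
-- 'x > max_val' where max_val starts at -math.inf: none models -inf (every int is greater)
def pvGtMax (x : Int) (m : Option Int) : Bool :=
  match m with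
  | none => true
  | some v => decide (v < x)

def index_of_max_in_lists (H : List (List Int)) : List (Option Int) :=
  (PySem.List.pyRange 0 (PySem.List.len H) 1).foldl
    (fun res i =>
      let sub := PySem.List.pyGetD H i []
      if sub = [] then res ++ [none]
      else
        let st := (PySem.List.pyRange 0 (PySem.List.len sub) 1).foldl
          (fun (st : Option Int × Int) j =>
            if pvGtMax (PySem.List.pyGetD sub j 0) st.1 then (some (PySem.List.pyGetD sub j 0), j)
            else st)
          (none, 0)
        res ++ [some st.2])
    []

-- ===== PORT B =====
-- sorted(range(len(sub)), key=sub.__getitem__, reverse=True)[0] if sub else None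
def index_of_max_in_lists_alt (H : List (List Int)) : List (Option Int) :=
  H.map (fun sub =>
    if sub = [] then none
    else PySem.List.pyGet?
      (PySem.List.sorted (PySem.List.pyRange 0 (PySem.List.len sub) 1)
        (fun j => PySem.List.pyGetD sub j 0) true) 0)

-- ===== PRECONDITION & SPEC =====
def Spec_index_of_max_in_lists (H : List (List Int)) (out : List (Option Int)) : Prop := out = index_of_max_in_lists_alt H
instance (H : List (List Int)) (out : List (Option Int)) : Decidable (Spec_index_of_max_in_lists H out) := by unfold Spec_index_of_max_in_lists; infer_instance

-- ===== CLAIM (what is proved, stated in full; the proofs are below) =====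
def Claim_equal_index_of_max_in_lists : Prop := ∀ (H : List (List Int)), Dom_index_of_max_in_lists H → Spec_index_of_max_in_lists H (index_of_max_in_lists H)

-- ===== LEMMAS AND PROOFS =====

-- the common "first argmax so far" accumulator both programs boil down to
def pvPick (key : Int → Int) (i j : Int) : Int := if key i < key j then j else i

-- A's inner loop, once the state holds a real value m = key i, tracks exactly pvPick
lemma pvA_state (key : Int → Int) (js : List Int) : ∀ (i : Int),
    js.foldl (fun (st : Option Int × Int) j =>
        if pvGtMax (key j) st.1 then (some (key j), j) else st) (some (key i), i)
      = (some (key (js.foldl (pvPick key) i)), js.foldl (pvPick key) i) := by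
  induction js with
  | nil => intro i; rfl
  | cons x r ih =>
    intro i
    simp only [List.foldl_cons]
    by_cases h : key i < key x
    · rw [if_pos (show pvGtMax (key x) (some (key i)) = true by simp [pvGtMax, h]), ih x]
      simp [pvPick, h]
    · rw [if_neg (show ¬ pvGtMax (key x) (some (key i)) = true by simp [pvGtMax, h]), ih i]
      simp [pvPick, h]

-- B's insertion fold: the head of the accumulator tracks exactly pvPick (stability of the sort)
lemma pvB_head (key : Int → Int) (js : List Int) : ∀ (h : Int) (t : List Int),
    ∃ t', js.foldl (fun a j => PySem.List.insertBy (fun a b => decide (key b < key a)) j a) (h :: t)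
      = (js.foldl (pvPick key) h) :: t' := by
  induction js with
  | nil => intro h t; exact ⟨t, rfl⟩
  | cons x r ih =>
    intro h t
    by_cases hx : key h < key x
    · simpa [PySem.List.insertBy, hx, pvPick] using ih x (h :: t)
    · simpa [PySem.List.insertBy, hx, pvPick] using
        ih h (PySem.List.insertBy (fun a b => decide (key b < key a)) x t)

-- A's per-sublist result
def pvA (sub : List Int) : Option Int :=
  if sub = [] then none
  else some (((PySem.List.pyRange 0 (PySem.List.len sub) 1).foldl
      (fun (st : Option Int × Int) j =>
        if pvGtMax (PySem.List.pyGetD sub j 0) st.1 then (some (PySem.List.pyGetD sub j 0), j)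
        else st) (none, 0)).2)

lemma A_eq_map (H : List (List Int)) : index_of_max_in_lists H = H.map pvA := by
  unfold index_of_max_in_lists
  rw [PySem.List.foldl_pyRange_zero_pyGetD H ([] : List Int)
      (fun res sub =>
        if sub = [] then res ++ [none]
        else res ++ [some (((PySem.List.pyRange 0 (PySem.List.len sub) 1).foldl
          (fun (st : Option Int × Int) j =>
            if pvGtMax (PySem.List.pyGetD sub j 0) st.1 then (some (PySem.List.pyGetD sub j 0), j)
            else st) (none, 0)).2)]) []]
  have hfun : (fun (res : List (Option Int)) (sub : List Int) =>
      if sub = [] then res ++ [none]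
      else res ++ [some (((PySem.List.pyRange 0 (PySem.List.len sub) 1).foldl
        (fun (st : Option Int × Int) j =>
          if pvGtMax (PySem.List.pyGetD sub j 0) st.1 then (some (PySem.List.pyGetD sub j 0), j)
          else st) (none, 0)).2)])
      = fun res sub => res ++ [pvA sub] := by
    funext res sub
    by_cases h : sub = [] <;> simp [h, pvA]
  rw [hfun, PySem.List.foldl_append_singleton_eq_map]
  simp

-- per-sublist agreement: both sides reduce to the same pvPick fold over the tail indices
lemma pvA_eq_alt (sub : List Int) :
    pvA sub = (if sub = [] then none
      else PySem.List.pyGet?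
        (PySem.List.sorted (PySem.List.pyRange 0 (PySem.List.len sub) 1)
          (fun j => PySem.List.pyGetD sub j 0) true) 0) := by
  cases sub with
  | nil => rfl
  | cons x t =>
    have hne : (x :: t : List Int) ≠ [] := by simp
    set key : Int → Int := fun j => PySem.List.pyGetD (x :: t) j 0 with hkey
    have hrange : PySem.List.pyRange 0 (PySem.List.len (x :: t)) 1
        = 0 :: PySem.List.pyRange 1 (PySem.List.len (x :: t)) 1 := by
      have hlen : (0:Int) < PySem.List.len (x :: t) := by
        rw [PySem.List.len_eq]; exact_mod_cast Nat.succ_pos t.length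
      exact PySem.List.pyRange_one_cons hlen
    -- A side
    have hA : pvA (x :: t)
        = some ((PySem.List.pyRange 1 (PySem.List.len (x :: t)) 1).foldl (pvPick key) 0) := by
      simp only [pvA, if_neg hne, hrange, List.foldl_cons]
      have h0 : pvGtMax (PySem.List.pyGetD (x :: t) 0 0) none = true := rfl
      rw [if_pos h0]
      have := pvA_state key (PySem.List.pyRange 1 (PySem.List.len (x :: t)) 1) 0
      simp only [hkey] at this
      rw [this]
    -- B side
    have hB : (PySem.List.pyGet?
        (PySem.List.sorted (PySem.List.pyRange 0 (PySem.List.len (x :: t)) 1) key true) 0)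
        = some ((PySem.List.pyRange 1 (PySem.List.len (x :: t)) 1).foldl (pvPick key) 0) := by
      rw [PySem.List.sorted_rev_eq_foldl_insertBy, hrange, List.foldl_cons]
      have h1 : PySem.List.insertBy (fun a b => decide (key b < key a)) 0 ([] : List Int)
          = [(0 : Int)] := by simp [PySem.List.insertBy]
      rw [h1]
      obtain ⟨t', ht'⟩ := pvB_head key (PySem.List.pyRange 1 (PySem.List.len (x :: t)) 1) 0 []
      rw [ht', PySem.List.pyGet?_zero_cons]
    rw [if_neg hne, hA, hB]

-- ===== VERDICT (by name: the statement is the Claim_ definition above) =====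
theorem index_of_max_in_lists_spec : Claim_equal_index_of_max_in_lists := by
  intro H _
  unfold Spec_index_of_max_in_lists index_of_max_in_lists_alt
  rw [A_eq_map]
  exact List.map_congr_left (fun sub _ => pvA_eq_alt sub)
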